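-- pv_equiv track=rewrite | github.com/FurkanKdzc/of2 | of2 düzenlenmiş hali/dosya ilemler/Alan.py | alan
-- ===== SOURCE A (Python) =====
-- def alan(x,n):
--     m=0
--     uzunkenar=x+2
--
--     for i in range(n):
--         alan=x*uzunkenar
--         m+=alan
--         uzunkenar+=2
--     return m
-- ===== SOURCE B (Python) =====
-- def alan(x, n):
--     if n <= 0:
--         return 0
--     return x * (n * (x + 2) + n * (n - 1))
-- ===== Notes on version B (the rewrite author's own statement) =====
-- stated objective: faster
-- what changed: Replaced the O(n) accumulation loop with the closed-form arithmetic-series formula x*(n*(x+2)+n*(n-1)), computed in O(1).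
import Mathlib
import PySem

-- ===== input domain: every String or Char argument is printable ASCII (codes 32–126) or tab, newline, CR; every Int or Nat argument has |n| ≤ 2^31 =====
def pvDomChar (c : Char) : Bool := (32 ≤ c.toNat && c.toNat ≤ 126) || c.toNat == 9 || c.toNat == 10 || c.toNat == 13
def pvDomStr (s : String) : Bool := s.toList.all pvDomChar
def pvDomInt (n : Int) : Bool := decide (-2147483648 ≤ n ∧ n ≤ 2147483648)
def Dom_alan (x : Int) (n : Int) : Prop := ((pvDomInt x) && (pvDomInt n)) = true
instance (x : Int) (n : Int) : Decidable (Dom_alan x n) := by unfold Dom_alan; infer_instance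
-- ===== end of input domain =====

-- B replaces A's O(n) accumulation loop with the O(1) closed-form series formula.


-- ===== PORT A =====
-- for i in range(n): accumulate m += x*uzunkenar; uzunkenar += 2
def alan (x : Int) (n : Int) : Int :=
  ((PySem.List.pyRange 0 n 1).foldl
    (fun (st : Int × Int) _ => (st.1 + x * st.2, st.2 + 2)) (0, x + 2)).1

-- ===== PORT B =====
def alan_alt (x : Int) (n : Int) : Int :=
  if n ≤ 0 then 0 else x * (n * (x + 2) + n * (n - 1))

-- ===== PRECONDITION & SPEC =====
def Spec_alan (x : Int) (n : Int) (out : Int) : Prop := out = alan_alt x n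
instance (x : Int) (n : Int) (out : Int) : Decidable (Spec_alan x n out) := by unfold Spec_alan; infer_instance

-- ===== CLAIM (what is proved, stated in full; the proofs are below) =====
def Claim_equal_alan : Prop := ∀ (x : Int) (n : Int), Dom_alan x n → Spec_alan x n (alan x n)

-- ===== LEMMAS AND PROOFS =====

-- the loop ignores the range elements; closed form as a function of the list length
theorem alan_foldl_closed (x : Int) (l : List Int) : ∀ (m u : Int),
    (l.foldl (fun (st : Int × Int) _ => (st.1 + x * st.2, st.2 + 2)) (m, u)).1
      = m + (l.length : Int) * x * u + x * (l.length : Int) * ((l.length : Int) - 1) := by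
  induction l with
  | nil => intro m u; simp
  | cons a t ih =>
      intro m u
      simp only [List.foldl_cons, ih, List.length_cons]
      push_cast
      ring

-- ===== VERDICT (by name: the statement is the Claim_ definition above) =====
theorem alan_spec : Claim_equal_alan := by
  intro x n _
  unfold Spec_alan alan alan_alt
  rw [alan_foldl_closed]
  rw [PySem.List.length_pyRange_one]
  by_cases h : n ≤ 0
  · simp [h]
  · rw [if_neg h]
    have : ((n - 0).toNat : Int) = n := by omega
    rw [this]
    ring
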